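-- pv_equiv track=rewrite | github.com/arthurvenicio/data-sctructures | codesignal/repeat_chat_jump/main.py | repeat_char_jump
-- ===== SOURCE A (Python) =====
-- def repeat_char_jump(inputString, k):
--     n = len(inputString)
--     res = ''
--     pointer = 0
--
--     while len(res) < n:
--         res += inputString[pointer]
--         pointer = (pointer + k) % n
--     return res
-- ===== SOURCE B (Python) =====
-- from math import gcd
--
-- def repeat_char_jump(inputString, k):
--     n = len(inputString)
--     if n == 0:
--         return ''
--     # The index sequence (i*k) % n is periodic with period p = n // gcd(k % n, n),
--     # so build one cycle and repeat it g times by string multiplication.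
--     g = gcd(k % n, n)
--     p = n // g
--     cycle = ''.join(inputString[(i * k) % n] for i in range(p))
--     return cycle * g
-- ===== Notes on version B (the rewrite author's own statement) =====
-- stated objective: faster
-- what changed: B exploits the cycle structure of the jump: the index sequence is periodic with period n//gcd(k%n,n), so it builds one cycle and repeats it by string multiplication instead of stepping a pointer through all n iterations with quadratic string concatenation.
import Mathlib
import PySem

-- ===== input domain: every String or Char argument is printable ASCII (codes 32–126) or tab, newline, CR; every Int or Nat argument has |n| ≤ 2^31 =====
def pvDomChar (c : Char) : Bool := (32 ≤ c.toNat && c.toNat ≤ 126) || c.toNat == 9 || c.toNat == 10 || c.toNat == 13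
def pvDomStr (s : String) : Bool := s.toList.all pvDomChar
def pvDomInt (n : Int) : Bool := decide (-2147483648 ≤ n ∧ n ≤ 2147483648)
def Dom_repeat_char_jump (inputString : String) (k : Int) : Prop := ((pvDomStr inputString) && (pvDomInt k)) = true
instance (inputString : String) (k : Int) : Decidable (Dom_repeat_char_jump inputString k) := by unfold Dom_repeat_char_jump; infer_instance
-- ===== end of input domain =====

-- B exploits the cycle structure of the jump sequence: the visited indices are periodic
-- with period n // gcd(k % n, n), so it builds one cycle and repeats it by string
-- multiplication instead of stepping a pointer for all n iterations (alternative algorithm).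

-- ===== PORT A =====
-- while len(res) < n: res += inputString[pointer]; pointer = (pointer + k) % n
-- each iteration appends exactly one char, so the loop runs (n - len(res)) more times: fuel.
-- inputString[pointer] via pyGet?; pointer is always in [0, n), so the none (IndexError) branch is unreachable.
def pvALoop (cs : List Char) (k : Int) : Nat → List Char → Int → List Char
  | 0, res, _ => res
  | Nat.succ f, res, pointer =>
    match PySem.List.pyGet? cs pointer with
    | none => res
    | some c => pvALoop cs k f (res ++ [c]) (PySem.Int.mod (pointer + k) (cs.length : Int))

def repeat_char_jump (inputString : String) (k : Int) : String :=
  String.ofList (pvALoop inputString.toList k inputString.toList.length [] 0)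

-- ===== PORT B =====
-- if n == 0: return ''; g = gcd(k % n, n); p = n // g;
-- cycle = ''.join(inputString[(i*k) % n] for i in range(p)); return cycle * g
-- math.gcd on the nonnegative k % n is Nat.gcd; the index is in [0, n) so getD's default is unreachable.
def repeat_char_jump_alt (inputString : String) (k : Int) : String :=
  let cs := inputString.toList
  let n := cs.length
  if n = 0 then "" else
    let g := Nat.gcd (PySem.Int.mod k (n : Int)).toNat n
    let p := n / g
    let cycle := (List.range p).map (fun (i : Nat) =>
      (PySem.List.pyGet? cs (PySem.Int.mod ((i : Int) * k) (n : Int))).getD ' ')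
    String.ofList (List.flatten (List.replicate g cycle))

-- ===== PRECONDITION & SPEC =====
def Spec_repeat_char_jump (inputString : String) (k : Int) (out : String) : Prop := out = repeat_char_jump_alt inputString k
instance (inputString : String) (k : Int) (out : String) : Decidable (Spec_repeat_char_jump inputString k out) := by unfold Spec_repeat_char_jump; infer_instance

-- ===== CLAIM (what is proved, stated in full; the proofs are below) =====
def Claim_equal_repeat_char_jump : Prop := ∀ (inputString : String) (k : Int), Dom_repeat_char_jump inputString k → Spec_repeat_char_jump inputString k (repeat_char_jump inputString k)

-- ===== LEMMAS AND PROOFS =====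

-- Invariant for A's loop: with fuel steps left, result res, and pointer (i*k) % n, the loop
-- appends exactly the characters at indices (j*k) % n for j = i, i+1, …, i+fuel-1.
theorem pvALoop_eq (cs : List Char) (k : Int) (hcs : cs ≠ []) :
    ∀ (fuel i : Nat) (res : List Char),
      pvALoop cs k fuel res (PySem.Int.mod ((i : Int) * k) (cs.length : Int)) =
        res ++ (List.range' i fuel).map (fun (j : Nat) =>
          (PySem.List.pyGet? cs (PySem.Int.mod ((j : Int) * k) (cs.length : Int))).getD ' ') := by
  intro fuel
  induction fuel with
  | zero => intro i res; simp [pvALoop]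
  | succ f ih =>
    intro i res
    have hn : (0 : Int) < (cs.length : Int) := by
      have := List.length_pos_iff.mpr hcs; exact_mod_cast this
    have h0 : (0 : Int) ≤ PySem.Int.mod ((i : Int) * k) (cs.length : Int) :=
      PySem.Int.mod_nonneg _ hn
    have h1 : PySem.Int.mod ((i : Int) * k) (cs.length : Int) < (cs.length : Int) :=
      PySem.Int.mod_lt _ hn
    have hget := PySem.List.pyGet?_eq_some_getElem cs h0 h1
    have hmod : PySem.Int.mod (PySem.Int.mod ((i : Int) * k) (cs.length : Int) + k) (cs.length : Int)
        = PySem.Int.mod (((i : Nat) + 1 : Nat) * k) (cs.length : Int) := by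
      rw [PySem.Int.mod_eq_emod_of_pos hn, PySem.Int.mod_eq_emod_of_pos hn,
          PySem.Int.mod_eq_emod_of_pos hn]
      push_cast
      rw [Int.add_emod ((i : Int) * k % (cs.length : Int)) k,
          Int.emod_emod_of_dvd _ dvd_rfl, ← Int.add_emod]
      ring_nf
    rw [pvALoop, hget, hmod]
    dsimp only
    rw [ih (i + 1), List.range'_succ]
    simp [hget]

-- A p-periodic function maps range' (a+p) m and range' a m to the same list.
theorem pvMapShift {α : Type} (f : Nat → α) (p : Nat) (hper : ∀ i, f (i + p) = f i) :
    ∀ (m a : Nat), (List.range' (a + p) m).map f = (List.range' a m).map f := by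
  intro m
  induction m with
  | zero => intro a; simp
  | succ m ih =>
    intro a
    rw [List.range'_succ, List.range'_succ, List.map_cons, List.map_cons, hper a]
    have : a + p + 1 = (a + 1) + p := by omega
    rw [this, ih (a + 1)]

-- Hence mapping over range (c*p) is c copies of the map over range p.
theorem pvMapCycle {α : Type} (f : Nat → α) (p : Nat) (hper : ∀ i, f (i + p) = f i) :
    ∀ (c : Nat), (List.range (c * p)).map f =
      (List.replicate c ((List.range p).map f)).flatten := by
  intro c
  induction c with
  | zero => simp
  | succ c ih =>
    have hsplit : List.range' 0 p ++ List.range' (0 + 1 * p) (c * p) = List.range' 0 (p + c * p) :=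
      List.range'_append ..
    have hcp : (c + 1) * p = p + c * p := by ring
    rw [List.range_eq_range', hcp, ← hsplit, List.map_append]
    have hshift : (List.range' (0 + 1 * p) (c * p)).map f = (List.range' 0 (c * p)).map f := by
      have : 0 + 1 * p = 0 + p := by omega
      rw [this]; exact pvMapShift f p hper (c * p) 0
    rw [hshift, ← List.range_eq_range', ← List.range_eq_range', ih, List.replicate_succ,
        List.flatten_cons]

-- ===== VERDICT (by name: the statement is the Claim_ definition above) =====
theorem repeat_char_jump_spec : Claim_equal_repeat_char_jump := by
  intro s k _
  unfold Spec_repeat_char_jump repeat_char_jump repeat_char_jump_alt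
  by_cases hcs : s.toList = []
  · simp [hcs, pvALoop]
  · have hlen : s.toList.length ≠ 0 := by simpa using hcs
    set cs := s.toList with hcsdef
    have hn : (0 : Int) < (cs.length : Int) := by
      have := List.length_pos_iff.mpr hcs; exact_mod_cast this
    set r : Int := PySem.Int.mod k (cs.length : Int) with hrdef
    set g : Nat := Nat.gcd r.toNat cs.length with hgdef
    set p : Nat := cs.length / g with hpdef
    have hgn : g ∣ cs.length := Nat.gcd_dvd_right _ _
    have hgpos : 0 < g := Nat.gcd_pos_of_pos_right _ (by omega)
    have hgp : g * p = cs.length := Nat.mul_div_cancel' hgn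
    -- n ∣ p * k  (the periodicity fact)
    have hrer : r = k % (cs.length : Int) := by rw [hrdef, PySem.Int.mod_eq_emod_of_pos hn]
    have hr0 : (0 : Int) ≤ r := hrdef ▸ PySem.Int.mod_nonneg _ hn
    have hdvd_r : (g : Int) ∣ r := by
      have : (g : Int) ∣ (r.toNat : Int) := Int.natCast_dvd_natCast.mpr (Nat.gcd_dvd_left _ _)
      rwa [Int.toNat_of_nonneg hr0] at this
    have hkr : (cs.length : Int) ∣ k - r := by
      rw [hrer]
      exact ⟨k / (cs.length : Int), by have := Int.emod_add_ediv k (cs.length : Int); linarith⟩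
    have hgpZ : (p : Int) * (g : Int) = (cs.length : Int) := by
      exact_mod_cast congrArg (Nat.cast (R := Int)) (by rw [Nat.mul_comm]; exact hgp)
    have hnk : (cs.length : Int) ∣ (p : Int) * k := by
      obtain ⟨q, hq⟩ := hkr
      obtain ⟨t, ht⟩ := hdvd_r
      refine ⟨(p : Int) * q + t, ?_⟩
      have hk : k = (cs.length : Int) * q + r := by linarith
      rw [hk, ht]
      linear_combination (t : Int) * hgpZ
    have hper : ∀ i, (fun (j : Nat) =>
        (PySem.List.pyGet? cs (PySem.Int.mod ((j : Int) * k) (cs.length : Int))).getD ' ') (i + p)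
      = (fun (j : Nat) =>
        (PySem.List.pyGet? cs (PySem.Int.mod ((j : Int) * k) (cs.length : Int))).getD ' ') i := by
      intro i
      have hm : PySem.Int.mod (((i + p : Nat) : Int) * k) (cs.length : Int)
           = PySem.Int.mod ((i : Int) * k) (cs.length : Int) := by
        rw [PySem.Int.mod_eq_emod_of_pos hn, PySem.Int.mod_eq_emod_of_pos hn]
        push_cast
        rw [Int.add_mul, Int.add_emod, Int.emod_eq_zero_of_dvd hnk, Int.add_zero,
            Int.emod_emod_of_dvd _ dvd_rfl]
      simpa using congrArg (fun x => (PySem.List.pyGet? cs x).getD ' ') hm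
    have hA := pvALoop_eq cs k hcs cs.length 0 []
    have h00 : PySem.Int.mod (((0 : Nat) : Int) * k) (cs.length : Int) = 0 := by
      rw [PySem.Int.mod_eq_emod_of_pos hn]; push_cast; simp
    rw [h00] at hA
    simp only [hlen, if_false]
    rw [hA, List.nil_append, ← List.range_eq_range',
        show List.range cs.length = List.range (g * p) from by rw [hgp],
        pvMapCycle _ p hper g]
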